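-- pv_equiv track=rewrite | github.com/stojan97/advent-of-code-2021 | day-13/solution.py | part2
-- ===== SOURCE A (Python) =====
-- def fold_it(points, folds):
--
--     final_points = set(points)
--
--     for coord, val in folds:
--         if coord == 'y':
--             for y, x in set(final_points):
--                 if y > val:
--                     next_y = val - (y - val)
--                     final_points.remove((y, x))
--                     final_points.add((next_y, x))
--
--         if coord == 'x':
--             for y, x in set(final_points):
--                 if x > val:
--                     next_x = val - (x - val)
--                     final_points.remove((y, x))
--                     final_points.add((y, next_x))
--
--     return final_points
--
-- def part2(input):
--     points, folds = input
--     final_points = fold_it(points, folds)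
--     limit_y, _ = max(final_points, key=lambda p: p[0])
--     _, limit_x = max(final_points, key=lambda p: p[1])
--     res = ''
--     for y in range(limit_y + 1):
--         for x in range(limit_x + 1):
--             if (y, x) in final_points:
--                 res += '#'
--             else:
--                 res += '.'
--         res += '\n'
--
--     return res
-- ===== SOURCE B (Python) =====
-- def fold_point(p, folds):
--     y, x = p
--     for coord, val in folds:
--         if coord == 'y' and y > val:
--             y = 2 * val - y
--         elif coord == 'x' and x > val:
--             x = 2 * val - x
--     return (y, x)
--
-- def part2(input):
--     points, folds = input
--     folded = {fold_point(p, folds) for p in points}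
--     limit_y = max(y for y, _ in folded)
--     limit_x = max(x for _, x in folded)
--     rows = {}
--     for y, x in folded:
--         rows.setdefault(y, set()).add(x)
--     out = []
--     for y in range(limit_y + 1):
--         xs = rows.get(y, ())
--         out.append(''.join('#' if x in xs else '.' for x in range(limit_x + 1)) + '\n')
--     return ''.join(out)
-- ===== Notes on version B (the rewrite author's own statement) =====
-- stated objective: simpler
-- what changed: B threads each point through the fold list once (pure per-point reflection) instead of repeatedly snapshotting and mutating a shared set per fold, and renders by grouping folded points into a per-row index (dict y -> set of x) built once, joining row strings, instead of testing every grid cell against one global set and concatenating characters onto one string; Pre_ excludes only the empty point list, on which both A and B raise ValueError at max().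
import Mathlib
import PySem

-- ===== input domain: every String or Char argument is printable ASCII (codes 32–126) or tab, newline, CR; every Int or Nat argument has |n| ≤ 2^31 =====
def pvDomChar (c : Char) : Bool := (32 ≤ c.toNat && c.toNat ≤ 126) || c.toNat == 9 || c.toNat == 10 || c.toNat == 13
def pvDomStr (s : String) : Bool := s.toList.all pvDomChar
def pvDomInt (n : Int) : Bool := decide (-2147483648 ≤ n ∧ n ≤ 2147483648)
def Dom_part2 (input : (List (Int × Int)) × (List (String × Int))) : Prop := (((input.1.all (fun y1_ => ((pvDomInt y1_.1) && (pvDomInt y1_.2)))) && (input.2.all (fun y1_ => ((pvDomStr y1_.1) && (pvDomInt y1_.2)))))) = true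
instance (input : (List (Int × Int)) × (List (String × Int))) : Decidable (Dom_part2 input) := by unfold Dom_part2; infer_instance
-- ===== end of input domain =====

-- B threads each point through the fold list once and renders from a per-row index (dict y -> set of x)
-- instead of mutating a shared set per fold and testing every cell against one global set (objective: simpler).

-- ===== PORT A =====
-- inner 'for y, x in set(final_points): if y > val: remove/add' loop of fold_it (the 'y' fold).
-- Python's set.remove raises KeyError only when the element is absent, which never happens on this
-- loop's executions (Claim_equal's proof shows the element is always present); the none-branch is unreachable.
def innerY (val : Int) (snap : List (Int × Int)) (s : PySem.Set (Int × Int)) : PySem.Set (Int × Int) :=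
  snap.foldl (fun t p =>
    if p.1 > val then
      match PySem.Set.remove? t p with
      | some t' => PySem.Set.add t' (val - (p.1 - val), p.2)
      | none => t
    else t) s

-- the symmetric 'x' fold loop
def innerX (val : Int) (snap : List (Int × Int)) (s : PySem.Set (Int × Int)) : PySem.Set (Int × Int) :=
  snap.foldl (fun t p =>
    if p.2 > val then
      match PySem.Set.remove? t p with
      | some t' => PySem.Set.add t' (p.1, val - (p.2 - val))
      | none => t
    else t) s

def fold_it (points : List (Int × Int)) (folds : List (String × Int)) : PySem.Set (Int × Int) :=
  folds.foldl (fun fp cv =>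
    let fp1 := if cv.1 == "y" then innerY cv.2 fp fp else fp
    if cv.1 == "x" then innerX cv.2 fp1 fp1 else fp1)
    (PySem.Set.ofList points)

def part2 (input : (List (Int × Int)) × (List (String × Int))) : String :=
  let final := fold_it input.1 input.2
  -- Python: limit_y, _ = max(final, key=p[0]); _, limit_x = max(final, key=p[1]); only the key
  -- components of the chosen elements are used, so the result is independent of set iteration order.
  match PySem.List.max? final (fun p => p.1), PySem.List.max? final (fun p => p.2) with
  | some my, some mx =>
    (PySem.List.pyRange 0 (my.1 + 1) 1).foldl (fun res y =>
      ((PySem.List.pyRange 0 (mx.2 + 1) 1).foldl (fun r x =>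
        r ++ (if PySem.Set.contains final (y, x) then "#" else ".")) res) ++ "\n") ""
  | _, _ => ""  -- unreachable under Pre_part2: Python's max raises ValueError on the empty set

-- ===== PORT B =====
def fold_point (p : Int × Int) (folds : List (String × Int)) : Int × Int :=
  folds.foldl (fun q cv =>
    if cv.1 == "y" && decide (q.1 > cv.2) then (2 * cv.2 - q.1, q.2)
    else if cv.1 == "x" && decide (q.2 > cv.2) then (q.1, 2 * cv.2 - q.2)
    else q) p

-- for y, x in folded: rows.setdefault(y, set()).add(x)
-- (values of a Dict built over a PySem.Set and only looked up afterwards: order-exact)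
def rowsOf (folded : List (Int × Int)) : PySem.Dict Int (PySem.Set Int) :=
  folded.foldl (fun d p => PySem.Dict.modify d p.1 [] (fun s => PySem.Set.add s p.2)) PySem.Dict.empty

def part2_alt (input : (List (Int × Int)) × (List (String × Int))) : String :=
  let folded := PySem.Set.ofList (input.1.map (fun p => fold_point p input.2))
  -- the 'none' fallbacks are unreachable under Pre_part2 (Python's max raises ValueError there)
  (PySem.List.max? (folded.map (fun p => p.1)) (fun v => v)).elim "" (fun ly =>
    (PySem.List.max? (folded.map (fun p => p.2)) (fun v => v)).elim "" (fun lx =>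
      let rows := rowsOf folded
      PySem.Str.join "" ((PySem.List.pyRange 0 (ly + 1) 1).map (fun y =>
        let xs := PySem.Dict.getD rows y []
        PySem.Str.join "" ((PySem.List.pyRange 0 (lx + 1) 1).map
          (fun x => if PySem.Set.contains xs x then "#" else ".")) ++ "\n"))))

-- ===== PRECONDITION & SPEC =====
-- Pre_ excludes only the empty point list, on which Python's max([]) raises ValueError in both A and B.
def Pre_part2 (input : (List (Int × Int)) × (List (String × Int))) : Prop := input.1 ≠ []
instance (input : (List (Int × Int)) × (List (String × Int))) : Decidable (Pre_part2 input) := by unfold Pre_part2; infer_instance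

def pvWitness_part2 : ((List (Int × Int)) × (List (String × Int))) := ([(0, 3), (4, 1)], [("y", 2), ("x", 1)])

def Spec_part2 (input : (List (Int × Int)) × (List (String × Int))) (out : String) : Prop := out = part2_alt input
instance (input : (List (Int × Int)) × (List (String × Int))) (out : String) : Decidable (Spec_part2 input out) := by unfold Spec_part2; infer_instance

-- ===== CLAIM (what is proved, stated in full; the proofs are below) =====
def Claim_equal_part2 : Prop := ∀ (input : (List (Int × Int)) × (List (String × Int))), Dom_part2 input → Pre_part2 input → Spec_part2 input (part2 input)

-- ===== LEMMAS AND PROOFS =====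

-- A's outer fold body and B's per-fold step, named for the proofs (definitionally the ports' lambdas)
def Abody (fp : PySem.Set (Int × Int)) (cv : String × Int) : PySem.Set (Int × Int) :=
  let fp1 := if cv.1 == "y" then innerY cv.2 fp fp else fp
  if cv.1 == "x" then innerX cv.2 fp1 fp1 else fp1

def Bstep (q : Int × Int) (cv : String × Int) : Int × Int :=
  if cv.1 == "y" && decide (q.1 > cv.2) then (2 * cv.2 - q.1, q.2)
  else if cv.1 == "x" && decide (q.2 > cv.2) then (q.1, 2 * cv.2 - q.2)
  else q

-- both inner loops are instances of one generic remove/add pass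
def innerPass (pred : Int × Int → Bool) (f : Int × Int → Int × Int)
    (snap s : List (Int × Int)) : List (Int × Int) :=
  snap.foldl (fun t p =>
    if pred p then
      match PySem.Set.remove? t p with
      | some t' => PySem.Set.add t' (f p)
      | none => t
    else t) s

theorem innerY_eq (v : Int) :
    innerY v = innerPass (fun p => decide (p.1 > v)) (fun p => (v - (p.1 - v), p.2)) := by
  funext snap s
  unfold innerY innerPass
  congr 1
  funext t p
  by_cases h : p.1 > v <;> simp [h]

theorem innerX_eq (v : Int) :
    innerX v = innerPass (fun p => decide (p.2 > v)) (fun p => (p.1, v - (p.2 - v))) := by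
  funext snap s
  unfold innerX innerPass
  congr 1
  funext t p
  by_cases h : p.2 > v <;> simp [h]

theorem innerPass_mem (pred : Int × Int → Bool) (f : Int × Int → Int × Int)
    (hf : ∀ p, pred p = true → pred (f p) = false) :
    ∀ (R P t : List (Int × Int)), (P ++ R).Nodup → t.Nodup →
      (∀ q, q ∈ t ↔ q ∈ R ∨ ∃ p ∈ P, (if pred p then f p else p) = q) →
      (innerPass pred f R t).Nodup ∧
      ∀ q, q ∈ innerPass pred f R t ↔ ∃ p ∈ P ++ R, (if pred p then f p else p) = q := by
  intro R
  induction R with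
  | nil =>
    intro P t _ hts hinv
    refine ⟨hts, fun q => ?_⟩
    simpa using hinv q
  | cons p R ih =>
    intro P t hnd hts hinv
    have hndR : (p :: R).Nodup := hnd.of_append_right
    have hdisj : P.Disjoint (p :: R) := List.disjoint_of_nodup_append hnd
    have hpt : p ∈ t := (hinv p).mpr (Or.inl (List.mem_cons_self))
    have hnd' : ((P ++ [p]) ++ R).Nodup := by
      rw [List.append_assoc]; simpa using hnd
    have hstep : innerPass pred f (p :: R) t
        = innerPass pred f R (if pred p then
            match PySem.Set.remove? t p with
            | some t' => PySem.Set.add t' (f p)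
            | none => t
          else t) := rfl
    by_cases hp : pred p = true
    · rw [hstep]
      rw [if_pos hp, PySem.Set.remove?_of_mem hpt]
      have ht2 : (PySem.Set.add (PySem.Set.discard t p) (f p)).Nodup :=
        PySem.Set.nodup_add _ _ (PySem.Set.nodup_discard _ _ hts)
      have hinv2 : ∀ q, q ∈ PySem.Set.add (PySem.Set.discard t p) (f p) ↔
          q ∈ R ∨ ∃ p' ∈ P ++ [p], (if pred p' then f p' else p') = q := by
        intro q
        rw [PySem.Set.mem_add, PySem.Set.mem_discard, hinv q]
        simp only [List.mem_cons, List.mem_append]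
        constructor
        · rintro (⟨(rfl | hR) | ⟨p', hp', hgp'⟩, hne⟩ | hfp)
          · exact absurd rfl hne
          · exact Or.inl hR
          · exact Or.inr ⟨p', Or.inl hp', hgp'⟩
          · exact Or.inr ⟨p, Or.inr (Or.inl rfl), by rw [if_pos hp, hfp]⟩
        · rintro (hR | ⟨p', hp' | (rfl | h0), hgp'⟩)
          · refine Or.inl ⟨Or.inl (Or.inr hR), ?_⟩
            rintro rfl
            exact (List.nodup_cons.mp hndR).1 hR
          · refine Or.inl ⟨Or.inr ⟨p', hp', hgp'⟩, ?_⟩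
            rintro rfl
            by_cases hpp : pred p' = true
            · rw [if_pos hpp] at hgp'
              have := hf p' hpp
              rw [hgp'] at this
              rw [this] at hp
              exact Bool.false_ne_true hp
            · rw [if_neg hpp] at hgp'
              subst hgp'
              exact hdisj hp' (List.mem_cons_self)
          · rw [if_pos hp] at hgp'
            exact Or.inr hgp'.symm
          · cases h0
      have h := ih (P ++ [p]) _ hnd' ht2 hinv2
      refine ⟨h.1, fun q => (h.2 q).trans ?_⟩
      rw [List.append_assoc]
      simp
    · rw [hstep, if_neg hp]
      have hinv2 : ∀ q, q ∈ t ↔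
          q ∈ R ∨ ∃ p' ∈ P ++ [p], (if pred p' then f p' else p') = q := by
        intro q
        rw [hinv q]
        simp only [List.mem_cons, List.mem_append]
        constructor
        · rintro ((rfl | hR) | ⟨p', hp', hgp'⟩)
          · refine Or.inr ⟨_, Or.inr (Or.inl rfl), ?_⟩
            rw [if_neg hp]
          · exact Or.inl hR
          · exact Or.inr ⟨p', Or.inl hp', hgp'⟩
        · rintro (hR | ⟨p', hp' | (rfl | h0), hgp'⟩)
          · exact Or.inl (Or.inr hR)
          · exact Or.inr ⟨p', hp', hgp'⟩
          · rw [if_neg hp] at hgp'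
            exact Or.inl (Or.inl hgp'.symm)
          · cases h0
      have h := ih (P ++ [p]) t hnd' hts hinv2
      refine ⟨h.1, fun q => (h.2 q).trans ?_⟩
      rw [List.append_assoc]
      simp

theorem innerPass_self (pred : Int × Int → Bool) (f : Int × Int → Int × Int)
    (hf : ∀ p, pred p = true → pred (f p) = false)
    (s : List (Int × Int)) (hs : s.Nodup) :
    (innerPass pred f s s).Nodup ∧
    ∀ q, q ∈ innerPass pred f s s ↔ ∃ p ∈ s, (if pred p then f p else p) = q := by
  have h := innerPass_mem pred f hf s [] s (by simpa using hs) hs (by intro q; simp)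
  simpa using h

theorem Abody_mem (cv : String × Int) (s : PySem.Set (Int × Int)) (hs : s.Nodup) :
    (Abody s cv).Nodup ∧ ∀ q, q ∈ Abody s cv ↔ ∃ p ∈ s, Bstep p cv = q := by
  by_cases hy : cv.1 == "y"
  · have hcv : cv.1 = "y" := by simpa using hy
    have hA : Abody s cv = innerY cv.2 s s := by
      simp [Abody, hcv]
    rw [hA, innerY_eq]
    have h := innerPass_self (fun p => decide (p.1 > cv.2)) (fun p => (cv.2 - (p.1 - cv.2), p.2))
      (by intro p hp; simp at hp ⊢; omega) s hs
    refine ⟨h.1, fun q => (h.2 q).trans ?_⟩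
    refine exists_congr fun p => and_congr_right fun _ => ?_
    have : Bstep p cv = if decide (p.1 > cv.2) then (cv.2 - (p.1 - cv.2), p.2) else p := by
      by_cases hgt : p.1 > cv.2 <;> (simp [Bstep, hcv, hgt, Prod.ext_iff]; try omega)
    rw [this]
  · by_cases hx : cv.1 == "x"
    · have hcv : cv.1 = "x" := by simpa using hx
      have hA : Abody s cv = innerX cv.2 s s := by
        simp [Abody, hcv]
      rw [hA, innerX_eq]
      have h := innerPass_self (fun p => decide (p.2 > cv.2)) (fun p => (p.1, cv.2 - (p.2 - cv.2)))
        (by intro p hp; simp at hp ⊢; omega) s hs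
      refine ⟨h.1, fun q => (h.2 q).trans ?_⟩
      refine exists_congr fun p => and_congr_right fun _ => ?_
      have : Bstep p cv = if decide (p.2 > cv.2) then (p.1, cv.2 - (p.2 - cv.2)) else p := by
        by_cases hgt : p.2 > cv.2 <;> (simp [Bstep, hcv, hgt, Prod.ext_iff]; try omega)
      rw [this]
    · have hA : Abody s cv = s := by
        simp [Abody, hy, hx]
      have hy' : cv.1 ≠ "y" := by simpa using hy
      have hx' : cv.1 ≠ "x" := by simpa using hx
      have hB : ∀ p, Bstep p cv = p := by
        intro p
        simp [Bstep, hy', hx']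
      rw [hA]
      refine ⟨hs, fun q => ?_⟩
      simp [hB, eq_comm]

theorem foldl_Abody_mem (folds : List (String × Int)) :
    ∀ (s : PySem.Set (Int × Int)), s.Nodup →
      (folds.foldl Abody s).Nodup ∧
      ∀ q, q ∈ folds.foldl Abody s ↔ ∃ p ∈ s, folds.foldl Bstep p = q := by
  induction folds with
  | nil =>
    intro s hs
    refine ⟨hs, fun q => ?_⟩
    simp [eq_comm]
  | cons cv folds ih =>
    intro s hs
    obtain ⟨h1, h2⟩ := Abody_mem cv s hs
    obtain ⟨ih1, ih2⟩ := ih (Abody s cv) h1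
    refine ⟨ih1, fun q => (ih2 q).trans ?_⟩
    simp only [List.foldl_cons]
    constructor
    · rintro ⟨r, hr, hq⟩
      obtain ⟨p, hp, rfl⟩ := (h2 r).mp hr
      exact ⟨p, hp, hq⟩
    · rintro ⟨p, hp, hq⟩
      exact ⟨Bstep p cv, (h2 (Bstep p cv)).mpr ⟨p, hp, rfl⟩, hq⟩

theorem mem_fold_it (points : List (Int × Int)) (folds : List (String × Int)) (q : Int × Int) :
    q ∈ fold_it points folds ↔ q ∈ points.map (fun p => fold_point p folds) := by
  have hfi : fold_it points folds = folds.foldl Abody (PySem.Set.ofList points) := rfl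
  have h := (foldl_Abody_mem folds (PySem.Set.ofList points) (PySem.Set.nodup_ofList points)).2 q
  rw [hfi, h]
  simp only [List.mem_map]
  exact exists_congr fun p => and_congr (PySem.Set.mem_ofList points p) (by rfl)

-- per-row index: x is in row y of rowsOf L exactly when (y, x) ∈ L
theorem mem_rows_foldl (L : List (Int × Int)) :
    ∀ (d : PySem.Dict Int (PySem.Set Int)) (y x : Int),
      x ∈ (L.foldl (fun d p => PySem.Dict.modify d p.1 [] (fun s => PySem.Set.add s p.2)) d).getD y []
        ↔ x ∈ d.getD y [] ∨ (y, x) ∈ L := by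
  induction L with
  | nil => intro d y x; simp
  | cons p t ih =>
    intro d y x
    rw [List.foldl_cons, ih, PySem.Dict.getD_modify]
    by_cases h : y = p.1
    · subst h
      rw [if_pos rfl, PySem.Set.mem_add]
      constructor
      · rintro ((hm | rfl) | ht)
        · exact Or.inl hm
        · exact Or.inr (List.mem_cons_self)
        · exact Or.inr (List.mem_cons_of_mem _ ht)
      · rintro (hm | hc)
        · exact Or.inl (Or.inl hm)
        · rcases List.mem_cons.mp hc with hc | ht
          · exact Or.inl (Or.inr (congrArg Prod.snd hc))
          · exact Or.inr ht
    · have hne : (y, x) ≠ p := fun hc => h (congrArg Prod.fst hc)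
      simp [h, hne]

theorem mem_rowsOf (L : List (Int × Int)) (y x : Int) :
    x ∈ PySem.Dict.getD (rowsOf L) y [] ↔ (y, x) ∈ L := by
  unfold rowsOf
  rw [mem_rows_foldl]
  simp

-- ''.join is concatenation
theorem chars_join_nil (l : List (List Char)) : PySem.Chars.join [] l = l.flatten := by
  show List.intercalate [] l = l.flatten
  induction l with
  | nil => rfl
  | cons a t ih =>
    cases t with
    | nil => simp [List.intercalate]
    | cons b u =>
      rw [List.flatten_cons, ← ih]
      simp [List.intercalate]

theorem foldl_str_inner (final : List (Int × Int)) (y : Int) (l : List Int) :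
    ∀ init : String,
      (l.foldl (fun r x => r ++ (if PySem.Set.contains final (y, x) then "#" else ".")) init).toList
        = init.toList ++ l.map (fun x => if PySem.Set.contains final (y, x) then '#' else '.') := by
  induction l with
  | nil => intro init; simp
  | cons x l ih =>
    intro init
    rw [List.foldl_cons, ih, String.toList_append]
    by_cases h : (y, x) ∈ final <;> simp [h]

theorem foldl_str_outer (final : List (Int × Int)) (lx : Int) (l : List Int) :
    ∀ init : String,
      (l.foldl (fun res y =>
        ((PySem.List.pyRange 0 (lx + 1) 1).foldl (fun r x =>
          r ++ (if PySem.Set.contains final (y, x) then "#" else ".")) res) ++ "\n") init).toList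
      = init.toList ++ l.flatMap (fun y =>
          (PySem.List.pyRange 0 (lx + 1) 1).map
            (fun x => if PySem.Set.contains final (y, x) then '#' else '.') ++ ['\n']) := by
  induction l with
  | nil => intro init; simp
  | cons y l ih =>
    intro init
    rw [List.foldl_cons, ih, String.toList_append, foldl_str_inner]
    simp

-- B's joined row string, character by character
theorem alt_row_toList (xs : PySem.Set Int) (lx : Int) :
    (PySem.Str.join "" ((PySem.List.pyRange 0 (lx + 1) 1).map
        (fun x => if PySem.Set.contains xs x then "#" else ".")) ++ "\n").toList
      = (PySem.List.pyRange 0 (lx + 1) 1).map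
          (fun x => if PySem.Set.contains xs x then '#' else '.') ++ ['\n'] := by
  rw [String.toList_append, PySem.Str.toList_join]
  show PySem.Chars.join [] _ ++ _ = _
  rw [chars_join_nil]
  congr 1
  rw [List.map_map, List.flatten_eq_flatMap, List.flatMap_map]
  induction (PySem.List.pyRange 0 (lx + 1) 1) with
  | nil => rfl
  | cons x t ih =>
    rw [List.flatMap_cons, List.map_cons, ih]
    by_cases h : x ∈ xs <;> simp [h]

-- ===== VERDICT (by name: the statement is the Claim_ definition above) =====
theorem part2_spec : Claim_equal_part2 := by
  unfold Claim_equal_part2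
  intro input _ hpre
  obtain ⟨points, folds⟩ := input
  unfold Spec_part2
  have hne : points ≠ [] := hpre
  have hmem := mem_fold_it points folds
  have hptsne : points.map (fun p => fold_point p folds) ≠ [] := by
    simpa using hne
  have hfinne : fold_it points folds ≠ [] := by
    obtain ⟨q, hq⟩ := List.exists_mem_of_ne_nil _ hptsne
    exact List.ne_nil_of_mem ((hmem q).mpr hq)
  have hfoldedmem : ∀ q, q ∈ PySem.Set.ofList (points.map (fun p => fold_point p folds))
      ↔ q ∈ points.map (fun p => fold_point p folds) :=
    fun q => PySem.Set.mem_ofList _ q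
  have hfoldedne : PySem.Set.ofList (points.map (fun p => fold_point p folds)) ≠ [] := by
    obtain ⟨q, hq⟩ := List.exists_mem_of_ne_nil _ hptsne
    exact List.ne_nil_of_mem ((hfoldedmem q).mpr hq)
  cases hA1 : PySem.List.max? (fold_it points folds) (fun p => p.1) with
  | none => exact absurd ((PySem.List.max?_eq_none_iff _ _).mp hA1) hfinne
  | some my =>
  cases hA2 : PySem.List.max? (fold_it points folds) (fun p => p.2) with
  | none => exact absurd ((PySem.List.max?_eq_none_iff _ _).mp hA2) hfinne
  | some mx =>
  cases hB1 : PySem.List.max? ((PySem.Set.ofList (points.map (fun p => fold_point p folds))).map (fun p => p.1)) (fun v => v) with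
  | none =>
    rw [PySem.List.max?_eq_none_iff] at hB1
    simp only [List.map_eq_nil_iff] at hB1
    exact absurd hB1 hfoldedne
  | some ly =>
  cases hB2 : PySem.List.max? ((PySem.Set.ofList (points.map (fun p => fold_point p folds))).map (fun p => p.2)) (fun v => v) with
  | none =>
    rw [PySem.List.max?_eq_none_iff] at hB2
    simp only [List.map_eq_nil_iff] at hB2
    exact absurd hB2 hfoldedne
  | some lx =>
  -- the two size limits agree: both are the maximal y- (resp. x-) coordinate
  have hly : ly = my.1 := by
    have h1 : my ∈ PySem.Set.ofList (points.map (fun p => fold_point p folds)) :=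
      (hfoldedmem my).mpr ((hmem my).mp (PySem.List.max?_mem hA1))
    have h2 := PySem.List.max?_mem hB1
    obtain ⟨q, hq, hq1⟩ := List.mem_map.mp h2
    have hle1 : my.1 ≤ ly :=
      PySem.List.max?_isMax hB1 my.1 (List.mem_map_of_mem h1)
    have hle2 : q.1 ≤ my.1 :=
      PySem.List.max?_isMax hA1 q ((hmem q).mpr ((hfoldedmem q).mp hq))
    omega
  have hlx : lx = mx.2 := by
    have h1 : mx ∈ PySem.Set.ofList (points.map (fun p => fold_point p folds)) :=
      (hfoldedmem mx).mpr ((hmem mx).mp (PySem.List.max?_mem hA2))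
    have h2 := PySem.List.max?_mem hB2
    obtain ⟨q, hq, hq2⟩ := List.mem_map.mp h2
    have hle1 : mx.2 ≤ lx :=
      PySem.List.max?_isMax hB2 mx.2 (List.mem_map_of_mem h1)
    have hle2 : q.2 ≤ mx.2 :=
      PySem.List.max?_isMax hA2 q ((hmem q).mpr ((hfoldedmem q).mp hq))
    omega
  show part2 (points, folds) = part2_alt (points, folds)
  unfold part2 part2_alt
  simp only [hA1, hA2, hB1, hB2, hly, hlx, Option.elim]
  apply String.toList_inj.mp
  rw [foldl_str_outer, PySem.Str.toList_join]
  show _ = PySem.Chars.join [] _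
  rw [chars_join_nil, List.map_map, List.flatten_eq_flatMap, List.flatMap_map]
  have hempty : ("" : String).toList = [] := rfl
  rw [hempty, List.nil_append]
  apply List.flatMap_congr
  intro y _
  simp only [Function.comp]
  rw [alt_row_toList]
  congr 1
  apply List.map_congr_left
  intro x _
  have hrow : PySem.Set.contains (PySem.Dict.getD (rowsOf (PySem.Set.ofList (points.map (fun p => fold_point p folds)))) y []) x
      = PySem.Set.contains (fold_it points folds) (y, x) := by
    by_cases hm : (y, x) ∈ points.map (fun p => fold_point p folds)
    · have h1 : x ∈ PySem.Dict.getD (rowsOf (PySem.Set.ofList (points.map (fun p => fold_point p folds)))) y [] :=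
        (mem_rowsOf _ y x).mpr ((hfoldedmem _).mpr hm)
      have h2 : (y, x) ∈ fold_it points folds := (hmem _).mpr hm
      simp [PySem.Set.contains, h1, h2]
    · have h1 : x ∉ PySem.Dict.getD (rowsOf (PySem.Set.ofList (points.map (fun p => fold_point p folds)))) y [] :=
        fun hc => hm ((hfoldedmem _).mp ((mem_rowsOf _ y x).mp hc))
      have h2 : (y, x) ∉ fold_it points folds := fun hc => hm ((hmem _).mp hc)
      simp [PySem.Set.contains, h1, h2]
  rw [hrow]
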